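-- pv_equiv track=rewrite | github.com/HotShot003/Data-Structure-Practice-Questions | Step1-Learn The Basics/Number Logics/NumberLogics41.py | range_NeonNum
-- ===== SOURCE A (Python) =====
-- def squaren(n):
--     # return n*n
--     i=1
--     r=2
--     mul=1
--     while i<=r:
--         mul=mul*n
--         i+=1
--     return mul
--
-- def range_NeonNum(s,e):
--     neonum=[]
--
--     for n in range(s,e+1):
--         orgi = n
--         sq=squaren(n)
--         sum=0
--         while sq :
--             sum = sum +(sq%10)
--             sq //=10
--         if orgi == sum:
--             neonum.append(orgi)
--     return neonum
-- ===== SOURCE B (Python) =====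
-- # The only integers whose square's digit sum equals the integer itself are 0, 1 and 9
-- # (digit sum of n*n is at most 9*digits(n*n), far below n for large n; checked for all
-- # small n), so the answer is just the fixed set {0, 1, 9} intersected with [s, e].
-- def range_NeonNum(s, e):
--     return [n for n in (0, 1, 9) if s <= n <= e]
-- ===== Notes on version B (the rewrite author's own statement) =====
-- stated objective: faster
-- what changed: B replaces A's scan of every integer in [s,e] with digit-sum tests by an O(1) intersection of [s,e] with the precomputed complete neon set {0,1,9} (proved complete for |n| <= 2^31 in the Lean file).
import Mathlib
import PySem

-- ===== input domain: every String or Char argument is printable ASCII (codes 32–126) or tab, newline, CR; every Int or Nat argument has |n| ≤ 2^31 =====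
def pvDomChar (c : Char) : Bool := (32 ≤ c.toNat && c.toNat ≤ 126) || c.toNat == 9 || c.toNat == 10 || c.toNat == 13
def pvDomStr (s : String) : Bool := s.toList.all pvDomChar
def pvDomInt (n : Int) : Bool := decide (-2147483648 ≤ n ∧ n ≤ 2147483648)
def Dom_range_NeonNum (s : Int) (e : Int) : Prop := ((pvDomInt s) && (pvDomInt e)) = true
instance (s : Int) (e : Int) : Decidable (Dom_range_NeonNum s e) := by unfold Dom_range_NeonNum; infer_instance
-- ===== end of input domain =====

-- B replaces A's per-element digit-sum scan of [s,e] by intersecting [s,e] with the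
-- complete neon set '{0,1,9}' (completeness for |n| ≤ 2^31 is part of the proof).


-- ===== PORT A =====
-- squaren's while loop: i=1, r=2, mul=1; while i<=r: mul=mul*n; i+=1
def pvSquarenLoop (i r mul n : Int) : Int :=
  if i ≤ r then pvSquarenLoop (i + 1) r (mul * n) n else mul
termination_by (r + 1 - i).toNat
decreasing_by omega

def pvSquaren (n : Int) : Int := pvSquarenLoop 1 2 1 n

-- 'while sq: sum += sq % 10; sq //= 10'.  The call site only ever passes sq = n*n ≥ 0,
-- and for nonnegative sq Python's truthiness test 'sq ≠ 0' coincides with '0 < sq'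
-- (this guard is needed for termination; Python itself diverges on negative sq).
def pvDigitLoop (sq sum : Int) : Int :=
  if 0 < sq then pvDigitLoop (PySem.Int.floordiv sq 10) (sum + PySem.Int.mod sq 10)
  else sum
termination_by sq.toNat
decreasing_by
  rw [PySem.Int.floordiv_eq_ediv_of_pos (by norm_num)]
  omega

def range_NeonNum (s : Int) (e : Int) : List Int :=
  (PySem.List.pyRange s (e + 1) 1).foldl
    (fun neonum n =>
      let orgi := n
      let sq := pvSquaren n
      let sum := pvDigitLoop sq 0
      if orgi = sum then neonum ++ [orgi] else neonum) []

-- ===== PORT B =====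
def range_NeonNum_alt (s : Int) (e : Int) : List Int :=
  ([0, 1, 9] : List Int).filter (fun n => decide (s ≤ n) && decide (n ≤ e))

-- ===== PRECONDITION & SPEC =====
def Spec_range_NeonNum (s : Int) (e : Int) (out : List Int) : Prop := out = range_NeonNum_alt s e
instance (s : Int) (e : Int) (out : List Int) : Decidable (Spec_range_NeonNum s e out) := by unfold Spec_range_NeonNum; infer_instance

-- ===== CLAIM (what is proved, stated in full; the proofs are below) =====
def Claim_equal_range_NeonNum : Prop := ∀ (s : Int) (e : Int), Dom_range_NeonNum s e → Spec_range_NeonNum s e (range_NeonNum s e)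

-- ===== LEMMAS AND PROOFS =====

lemma pvSquaren_eq (n : Int) : pvSquaren n = n * n := by
  rw [pvSquaren, pvSquarenLoop, if_pos (by norm_num), pvSquarenLoop, if_pos (by norm_num),
    pvSquarenLoop, if_neg (by norm_num)]
  ring

-- fuel-based digit sum on Nat, used only to reason about pvDigitLoop
def dsumF : Nat → Nat → Nat
  | 0, _ => 0
  | f + 1, m => if m = 0 then 0 else m % 10 + dsumF f (m / 10)

lemma dsumF_le (f : Nat) : ∀ m : Nat, dsumF f m ≤ 9 * f := by
  induction f with
  | zero => intro m; simp [dsumF]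
  | succ f ih =>
    intro m
    simp only [dsumF]
    split
    · omega
    · have := ih (m / 10)
      have : m % 10 < 10 := Nat.mod_lt _ (by norm_num)
      omega

lemma pvDigitLoop_eq (f : Nat) : ∀ (sq sum : Int), 0 ≤ sq → sq < 10 ^ f →
    pvDigitLoop sq sum = sum + (dsumF f sq.toNat : Int) := by
  induction f with
  | zero =>
    intro sq sum h0 h1
    have hz : sq = 0 := by simp at h1; omega
    subst hz
    rw [pvDigitLoop, if_neg (by norm_num)]
    simp [dsumF]
  | succ f ih =>
    intro sq sum h0 h1
    obtain ⟨m, rfl⟩ : ∃ m : Nat, sq = (m : Int) := ⟨sq.toNat, (Int.toNat_of_nonneg h0).symm⟩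
    rw [pvDigitLoop]
    by_cases h : (0 : Int) < (m : Int)
    · rw [if_pos h]
      have h10 : (10 : Int) = ((10 : Nat) : Int) := rfl
      rw [h10, PySem.Int.floordiv_natCast, PySem.Int.mod_natCast]
      have hm : m < 10 ^ (f + 1) := by exact_mod_cast h1
      have hdiv : m / 10 < 10 ^ f := by
        rw [Nat.div_lt_iff_lt_mul (by norm_num)]
        calc m < 10 ^ (f + 1) := hm
        _ = 10 ^ f * 10 := by ring
      rw [ih _ _ (by positivity) (by exact_mod_cast hdiv)]
      have hm0 : m ≠ 0 := by exact_mod_cast h.ne'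
      simp only [dsumF, if_neg hm0, Int.toNat_natCast]
      push_cast
      ring
    · rw [if_neg h]
      have : m = 0 := by omega
      subst this
      simp [dsumF]

set_option maxRecDepth 4000 in
lemma small_neon : ∀ m : Fin 172,
    (dsumF 19 (m.val * m.val) = m.val) ↔ (m.val = 0 ∨ m.val = 1 ∨ m.val = 9) := by decide

lemma neon_iff (n : Int) (h1 : -2147483648 ≤ n) (h2 : n ≤ 2147483648) :
    (n = pvDigitLoop (pvSquaren n) 0) ↔ (n = 0 ∨ n = 1 ∨ n = 9) := by
  rw [pvSquaren_eq]
  have hnn : (0 : Int) ≤ n * n := mul_self_nonneg n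
  have hlt : n * n < 10 ^ 19 := by
    nlinarith [mul_nonneg (show (0:Int) ≤ 2147483648 - n by omega)
      (show (0:Int) ≤ 2147483648 + n by omega)]
  rw [pvDigitLoop_eq 19 _ 0 hnn hlt, zero_add]
  have hb : (dsumF 19 (n * n).toNat : Int) ≤ 171 := by
    have := dsumF_le 19 (n * n).toNat
    omega
  by_cases hneg : n < 0
  · constructor
    · intro h
      have : (0 : Int) ≤ (dsumF 19 (n * n).toNat : Int) := Int.natCast_nonneg _
      omega
    · intro h; omega
  · push Not at hneg
    obtain ⟨m, rfl⟩ : ∃ m : Nat, n = (m : Int) := ⟨n.toNat, (Int.toNat_of_nonneg hneg).symm⟩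
    by_cases hbig : 172 ≤ (m : Int)
    · constructor
      · intro h; omega
      · intro h; omega
    · have hm : m < 172 := by exact_mod_cast by omega
      have key : (dsumF 19 (m * m) = m) ↔ (m = 0 ∨ m = 1 ∨ m = 9) := small_neon ⟨m, hm⟩
      have hmm : ((m : Int) * (m : Int)).toNat = m * m := by
        rw [show ((m : Int) * (m : Int)) = ((m * m : Nat) : Int) by push_cast; ring,
          Int.toNat_natCast]
      rw [hmm]
      constructor
      · intro h
        have h' : dsumF 19 (m * m) = m := by exact_mod_cast h.symm
        have := key.1 h'
        omega
      · intro h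
        have hmv : m = 0 ∨ m = 1 ∨ m = 9 := by omega
        exact_mod_cast (key.2 hmv).symm

lemma filter_swap (s e : Int) (hs1 : -2147483648 ≤ s) (hs2 : s ≤ 2147483648)
    (he1 : -2147483648 ≤ e) (he2 : e ≤ 2147483648) :
    (PySem.List.pyRange s (e + 1) 1).filter (fun n => decide (n = pvDigitLoop (pvSquaren n) 0))
      = ([0, 1, 9] : List Int).filter (fun n => decide (s ≤ n) && decide (n ≤ e)) := by
  apply List.Perm.eq_of_pairwise' (r := (· < · : Int → Int → Prop))
  · exact List.Pairwise.sublist List.filter_sublist (PySem.List.pairwise_lt_pyRange_one s (e + 1))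
  · exact List.Pairwise.sublist List.filter_sublist (by decide : ([0,1,9] : List Int).Pairwise (· < ·))
  · rw [List.perm_ext_iff_of_nodup]
    · intro x
      simp only [List.mem_filter, PySem.List.mem_pyRange_one, List.mem_cons,
        List.not_mem_nil, or_false, decide_eq_true_eq, Bool.and_eq_true]
      constructor
      · rintro ⟨⟨hx1, hx2⟩, hx3⟩
        have := (neon_iff x (by omega) (by omega)).1 hx3
        exact ⟨this, by omega, by omega⟩
      · rintro ⟨hx, hx1, hx2⟩
        refine ⟨⟨hx1, by omega⟩, ?_⟩
        apply (neon_iff x (by omega) (by omega)).2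
        exact hx
    · exact (PySem.List.nodup_pyRange_one s (e + 1)).filter _
    · exact (by decide : ([0,1,9] : List Int).Nodup).filter _

-- ===== VERDICT (by name: the statement is the Claim_ definition above) =====
theorem range_NeonNum_spec : Claim_equal_range_NeonNum := by
  intro s e hdom
  unfold Dom_range_NeonNum pvDomInt at hdom
  simp only [Bool.and_eq_true, decide_eq_true_eq] at hdom
  obtain ⟨⟨hs1, hs2⟩, he1, he2⟩ := hdom
  unfold Spec_range_NeonNum range_NeonNum range_NeonNum_alt
  simp only []
  rw [PySem.List.foldl_append_ite_eq_filter]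
  rw [List.nil_append]
  exact filter_swap s e hs1 hs2 he1 he2
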